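-- pv_equiv track=rewrite | github.com/mbayegueye1/TpsPython | Approche imp/tp05_fonctions/EX01_SOMME_NB_PAIRS.py | somme_parair
-- ===== SOURCE A (Python) =====
-- def somme_parair(i):
--     ma_liste =[]
--     somme_pairs = 0
--     for a in range(i):
--         ma_liste.append(a)
--         for j in range(len(ma_liste)):
--             if ma_liste[j]%2 == 0:
--                 somme_pairs = somme_pairs + ma_liste[j]
--     return somme_pairs
-- ===== SOURCE B (Python) =====
-- def somme_parair(i):
--     somme_pairs = 0
--     even_sum = 0
--     for a in range(i):
--         if a % 2 == 0:
--             even_sum += a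
--         somme_pairs += even_sum
--     return somme_pairs
-- ===== Notes on version B (the rewrite author's own statement) =====
-- stated objective: faster
-- what changed: Replaced the nested loop that re-scans the growing list of all previous values on every iteration by a single pass maintaining a running even-sum accumulator added to the total each step.
import Mathlib
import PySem

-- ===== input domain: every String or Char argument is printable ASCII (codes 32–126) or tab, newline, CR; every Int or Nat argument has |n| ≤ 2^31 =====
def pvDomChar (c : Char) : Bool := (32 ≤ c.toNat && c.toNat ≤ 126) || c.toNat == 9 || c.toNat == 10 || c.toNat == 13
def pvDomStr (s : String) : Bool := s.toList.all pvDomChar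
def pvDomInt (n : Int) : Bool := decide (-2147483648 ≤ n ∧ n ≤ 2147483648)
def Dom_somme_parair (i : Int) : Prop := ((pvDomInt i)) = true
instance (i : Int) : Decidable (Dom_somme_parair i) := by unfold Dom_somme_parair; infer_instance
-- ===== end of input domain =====

-- B replaces A's nested re-scan of the growing list by a single pass with a
-- running even-sum accumulator (asymptotically faster; return value identical).

-- ===== PORT A =====
-- ma_liste[j] with j ∈ range(len(ma_liste)) is always in range, so pyGetD with
-- default 0 is exact here.
def somme_parair (i : Int) : Int :=
  ((PySem.List.pyRange 0 i 1).foldl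
    (fun (st : List Int × Int) a =>
      let ml := st.1 ++ [a]
      let s := (PySem.List.pyRange 0 (ml.length : Int) 1).foldl
        (fun s j =>
          if PySem.Int.mod (PySem.List.pyGetD ml j 0) 2 = 0 then
            s + PySem.List.pyGetD ml j 0
          else s) st.2
      (ml, s))
    ([], 0)).2

-- ===== PORT B =====
def somme_parair_alt (i : Int) : Int :=
  ((PySem.List.pyRange 0 i 1).foldl
    (fun (st : Int × Int) a =>
      let es := if PySem.Int.mod a 2 = 0 then st.1 + a else st.1
      (es, st.2 + es))
    (0, 0)).2

-- ===== PRECONDITION & SPEC =====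
def Spec_somme_parair (i : Int) (out : Int) : Prop := out = somme_parair_alt i
instance (i : Int) (out : Int) : Decidable (Spec_somme_parair i out) := by unfold Spec_somme_parair; infer_instance

-- ===== CLAIM (what is proved, stated in full; the proofs are below) =====
def Claim_equal_somme_parair : Prop := ∀ (i : Int), Dom_somme_parair i → Spec_somme_parair i (somme_parair i)

-- ===== LEMMAS AND PROOFS =====

-- sum of the even elements of a list (the value A's inner loop adds)
def pvEvenSum (ml : List Int) : Int :=
  ml.foldl (fun s v => if PySem.Int.mod v 2 = 0 then s + v else s) 0

lemma pvEvenSum_foldl (ml : List Int) (s : Int) :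
    ml.foldl (fun s v => if PySem.Int.mod v 2 = 0 then s + v else s) s
      = s + pvEvenSum ml := by
  induction ml generalizing s with
  | nil => simp [pvEvenSum]
  | cons x xs ih =>
    simp only [pvEvenSum, List.foldl_cons]
    rw [ih, ih (if PySem.Int.mod x 2 = 0 then 0 + x else 0)]
    split_ifs <;> ring

lemma pvEvenSum_append (ml : List Int) (a : Int) :
    pvEvenSum (ml ++ [a]) = pvEvenSum ml + (if PySem.Int.mod a 2 = 0 then a else 0) := by
  simp only [pvEvenSum, List.foldl_append, List.foldl_cons, List.foldl_nil]
  rw [pvEvenSum_foldl]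
  split_ifs <;> simp [pvEvenSum]

-- A's inner loop over indices equals adding the even-sum of the list
lemma pv_inner (ml : List Int) (s : Int) :
    (PySem.List.pyRange 0 (ml.length : Int) 1).foldl
      (fun s j =>
        if PySem.Int.mod (PySem.List.pyGetD ml j 0) 2 = 0 then
          s + PySem.List.pyGetD ml j 0
        else s) s = s + pvEvenSum ml := by
  rw [PySem.List.foldl_pyRange_zero_pyGetD'
    (f := fun s v => if PySem.Int.mod v 2 = 0 then s + v else s)]
  exact pvEvenSum_foldl ml s

-- main invariant: A's fold and B's fold agree when es = pvEvenSum ml and totals match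
lemma pv_main (l : List Int) (ml : List Int) (s : Int) :
    (l.foldl
      (fun (st : List Int × Int) a =>
        let ml := st.1 ++ [a]
        let s := (PySem.List.pyRange 0 (ml.length : Int) 1).foldl
          (fun s j =>
            if PySem.Int.mod (PySem.List.pyGetD ml j 0) 2 = 0 then
              s + PySem.List.pyGetD ml j 0
            else s) st.2
        (ml, s))
      (ml, s)).2
    = (l.foldl
        (fun (st : Int × Int) a =>
          let es := if PySem.Int.mod a 2 = 0 then st.1 + a else st.1
          (es, st.2 + es))
        (pvEvenSum ml, s)).2 := by
  induction l generalizing ml s with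
  | nil => rfl
  | cons a l ih =>
    simp only [List.foldl_cons]
    rw [ih]
    congr 1
    rw [pv_inner]
    rw [pvEvenSum_append]
    split_ifs <;> ring_nf

-- ===== VERDICT (by name: the statement is the Claim_ definition above) =====
theorem somme_parair_spec : Claim_equal_somme_parair := by
  intro i _
  unfold Spec_somme_parair somme_parair somme_parair_alt
  have := pv_main (PySem.List.pyRange 0 i 1) [] 0
  simpa [pvEvenSum] using this
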